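-- pv_equiv track=rewrite | github.com/gitrahulgit/langchain | model_solution.py | parse_extracted_classes
-- ===== SOURCE A (Python) =====
-- from typing import TypedDict, Dict
--
-- def parse_extracted_classes(extraction_result: str) -> Dict[str, str]:
--     """Helper function to parse the extracted classes from LLM output."""
--     classes = {}
--     current_class = ""
--     current_code = []
--
--     for line in extraction_result.splitlines():
--         if len(line.strip().split()) > 1 and line.strip().split()[1] == 'class':
--             if current_class:
--                 classes[current_class] = "\n".join(current_code)
--             current_class = line.split()[1].split('(')[0].split('{')[0]
--             current_code = [line]
--         elif current_class:
--             current_code.append(line)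
--
--     if current_class:
--         classes[current_class] = "\n".join(current_code)
--
--     return classes
-- ===== SOURCE B (Python) =====
-- def _is_header(line):
--     t = line.strip().split()
--     return len(t) > 1 and t[1] == 'class'
--
--
-- def parse_extracted_classes(extraction_result: str):
--     """Two-pass: locate the class-header lines, then emit one joined segment per header."""
--     lines = extraction_result.splitlines()
--     classes = {}
--     i, n = 0, len(lines)
--     while i < n and not _is_header(lines[i]):
--         i += 1
--     while i < n:
--         j = i + 1
--         while j < n and not _is_header(lines[j]):
--             j += 1
--         name = lines[i].split()[1].split('(')[0].split('{')[0]
--         classes[name] = "\n".join(lines[i:j])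
--         i = j
--     return classes
-- ===== Notes on version B (the rewrite author's own statement) =====
-- stated objective: alternative
-- what changed: Replaces A's single-pass state machine (current_class/current_code accumulators mutated line by line) with a two-pass boundary scan: first advance to each class-header line, then take the whole segment up to the next header and join it in one step.
import Mathlib
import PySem

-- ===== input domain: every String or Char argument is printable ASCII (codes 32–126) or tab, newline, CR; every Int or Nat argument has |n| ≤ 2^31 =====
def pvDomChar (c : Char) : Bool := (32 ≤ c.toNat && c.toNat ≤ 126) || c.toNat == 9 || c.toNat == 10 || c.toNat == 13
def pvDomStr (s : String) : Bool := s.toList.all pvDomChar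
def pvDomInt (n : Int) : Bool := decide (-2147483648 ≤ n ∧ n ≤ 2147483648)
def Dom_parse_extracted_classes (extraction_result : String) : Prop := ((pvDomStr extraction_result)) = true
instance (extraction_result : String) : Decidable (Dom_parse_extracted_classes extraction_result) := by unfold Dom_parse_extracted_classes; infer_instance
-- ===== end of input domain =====

-- B replaces A's running current_class/current_code state machine by a two-pass boundary scan
-- (find each header line, then join the whole segment up to the next header); alternative
-- decomposition, same cost. Equivalence of the RETURN value is proved for every input.

-- ===== PORT A =====
-- len(line.strip().split()) > 1 and line.strip().split()[1] == 'class'   (the [1] is guarded by the length test)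
def pvIsHeaderA (line : String) : Bool :=
  decide (1 < (PySem.Str.split₀ (PySem.Str.strip line)).length) &&
    ((PySem.Str.split₀ (PySem.Str.strip line)).getD 1 "" == "class")

-- line.split()[1].split('(')[0].split('{')[0]; the [1] cannot raise: line.split() equals
-- line.strip().split() (lemma pv_split₀_strip below) which has length > 1 at every call site,
-- and str.split(sep) never returns an empty list, so the [0]s cannot raise either.
def pvNameA (line : String) : String :=
  -- split? is `some` at both calls (the separator literals are nonempty)
  ((PySem.Str.split? (((PySem.Str.split? ((PySem.Str.split₀ line).getD 1 "") "(").getD []).getD 0 "") "{").getD []).getD 0 ""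

-- the trailing `if current_class:` insert after A's loop
def pvFinA (st : PySem.Dict String String × String × List String) : PySem.Dict String String :=
  if st.2.1 ≠ "" then st.1.insert st.2.1 (PySem.Str.join "\n" st.2.2) else st.1

-- loop body of A's for-line loop; state = (classes, current_class, current_code)
def pvStepA (st : PySem.Dict String String × String × List String) (line : String) :
    PySem.Dict String String × String × List String :=
  if pvIsHeaderA line then
    ((if st.2.1 ≠ "" then st.1.insert st.2.1 (PySem.Str.join "\n" st.2.2) else st.1),
      pvNameA line, [line])
  else if st.2.1 ≠ "" then (st.1, st.2.1, st.2.2 ++ [line])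
  else st

def parse_extracted_classes (extraction_result : String) : List (String × String) :=
  (pvFinA ((PySem.Str.splitlines extraction_result).foldl pvStepA (PySem.Dict.empty, "", []))).items

-- ===== PORT B =====
def pvIsHeaderB (line : String) : Bool :=
  decide (1 < (PySem.Str.split₀ (PySem.Str.strip line)).length) &&
    ((PySem.Str.split₀ (PySem.Str.strip line)).getD 1 "" == "class")

def pvNameB (line : String) : String :=
  ((PySem.Str.split? (((PySem.Str.split? ((PySem.Str.split₀ line).getD 1 "") "(").getD []).getD 0 "") "{").getD []).getD 0 ""

-- Source B's outer while: `lines[i]` is a header; the inner while advances j past the following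
-- non-header lines, i.e. splits the remaining lines with span; the segment lines[i:j] is the
-- header line plus that span.
def pvSegsB (lines : List String) (d : PySem.Dict String String) : PySem.Dict String String :=
  match lines with
  | [] => d
  | h :: rest =>
    let p := rest.span (fun l => !pvIsHeaderB l)
    pvSegsB p.2 (d.insert (pvNameB h) (PySem.Str.join "\n" (h :: p.1)))
termination_by lines.length
decreasing_by
  simp only [List.span_eq_takeWhile_dropWhile]
  have := List.length_dropWhile_le (p := fun l => !pvIsHeaderB l) (l := rest)
  simp only [List.length_cons]
  omega

def parse_extracted_classes_alt (extraction_result : String) : List (String × String) :=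
  -- the dropWhile is Source B's first while loop: skip the lines before the first header
  (pvSegsB ((PySem.Str.splitlines extraction_result).dropWhile (fun l => !pvIsHeaderB l))
    PySem.Dict.empty).items

-- ===== PRECONDITION & SPEC =====
def Spec_parse_extracted_classes (extraction_result : String) (out : List (String × String)) : Prop := out = parse_extracted_classes_alt extraction_result
instance (extraction_result : String) (out : List (String × String)) : Decidable (Spec_parse_extracted_classes extraction_result out) := by unfold Spec_parse_extracted_classes; infer_instance

-- ===== CLAIM (what is proved, stated in full; the proofs are below) =====
def Claim_equal_parse_extracted_classes : Prop := ∀ (extraction_result : String), Dom_parse_extracted_classes extraction_result → Spec_parse_extracted_classes extraction_result (parse_extracted_classes extraction_result)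

-- ===== LEMMAS AND PROOFS =====

theorem pvNameB_eq (l : String) : pvNameB l = pvNameA l := rfl

theorem pv_go_lstrip (s : List Char) (acc : List (List Char)) :
    PySem.Chars.split₀.go s [] acc =
      PySem.Chars.split₀.go (s.dropWhile PySem.Chars.isspace) [] acc := by
  induction s with
  | nil => rfl
  | cons c rest ih =>
    by_cases h : PySem.Chars.isspace c = true
    · simp [PySem.Chars.split₀.go, h, List.dropWhile, ih]
    · simp [List.dropWhile, h]

theorem pv_go_spaces (t : List Char) (ht : ∀ c ∈ t, PySem.Chars.isspace c = true)
    (cur : List Char) (acc : List (List Char)) :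
    PySem.Chars.split₀.go t cur acc = PySem.Chars.split₀.go [] cur acc := by
  induction t generalizing cur acc with
  | nil => rfl
  | cons c rest ih =>
    have hc : PySem.Chars.isspace c = true := ht c (by simp)
    have ht' : ∀ c ∈ rest, PySem.Chars.isspace c = true := fun c hm => ht c (by simp [hm])
    by_cases hcur : cur.isEmpty = true
    · have : cur = [] := by simpa [List.isEmpty_iff] using hcur
      subst this
      simp [PySem.Chars.split₀.go, hc, ih ht']
    · have hcur' : ¬ cur = [] := by simpa [List.isEmpty_iff] using hcur
      simp [PySem.Chars.split₀.go, hc, hcur, ih ht']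

theorem pv_go_append_spaces (s t : List Char) (ht : ∀ c ∈ t, PySem.Chars.isspace c = true)
    (cur : List Char) (acc : List (List Char)) :
    PySem.Chars.split₀.go (s ++ t) cur acc = PySem.Chars.split₀.go s cur acc := by
  induction s generalizing cur acc with
  | nil => simpa using pv_go_spaces t ht cur acc
  | cons c rest ih =>
    by_cases hc : PySem.Chars.isspace c = true
    · by_cases hcur : cur.isEmpty = true
      · simp [PySem.Chars.split₀.go, hc, hcur, ih]
      · simp [PySem.Chars.split₀.go, hc, hcur, ih]
    · simp [PySem.Chars.split₀.go, hc, ih]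

theorem pv_split₀_strip (cs : List Char) :
    PySem.Chars.split₀ (PySem.Chars.strip cs) = PySem.Chars.split₀ cs := by
  have h1 : PySem.Chars.split₀ cs = PySem.Chars.split₀ (PySem.Chars.lstrip cs) := by
    simpa [PySem.Chars.split₀, PySem.Chars.lstrip] using pv_go_lstrip cs []
  set u := PySem.Chars.lstrip cs with hu
  have hdecomp : u = PySem.Chars.rstrip u ++ (u.reverse.takeWhile PySem.Chars.isspace).reverse :=
    calc u = u.reverse.reverse := (List.reverse_reverse u).symm
    _ = ((u.reverse.takeWhile PySem.Chars.isspace) ++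
          (u.reverse.dropWhile PySem.Chars.isspace)).reverse := by
          rw [List.takeWhile_append_dropWhile]
    _ = _ := List.reverse_append ..
  have hsp : ∀ c ∈ (u.reverse.takeWhile PySem.Chars.isspace).reverse,
      PySem.Chars.isspace c = true := by
    intro c hm
    exact List.mem_takeWhile_imp (by simpa using hm)
  have h2 : PySem.Chars.split₀ u = PySem.Chars.split₀ (PySem.Chars.rstrip u) := by
    conv_lhs => rw [hdecomp]
    simpa [PySem.Chars.split₀] using
      pv_go_append_spaces (PySem.Chars.rstrip u) _ hsp [] []
  rw [h1, h2]
  rfl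

theorem pv_split₀_strip_str (s : String) :
    PySem.Str.split₀ (PySem.Str.strip s) = PySem.Str.split₀ s := by
  simp [PySem.Str.split₀, pv_split₀_strip]

theorem pv_name_class (l : String) (h : pvIsHeaderA l = true) : pvNameA l = "class" := by
  unfold pvIsHeaderA at h
  rw [pv_split₀_strip_str] at h
  simp only [Bool.and_eq_true, decide_eq_true_eq, beq_iff_eq] at h
  unfold pvNameA
  rw [h.2]
  rfl

theorem pv_L1 (lines : List String) (d : PySem.Dict String String) (cc : String)
    (code : List String) (hcc : cc ≠ "") :
    pvFinA (lines.foldl pvStepA (d, cc, code)) =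
      pvSegsB (lines.dropWhile (fun l => !pvIsHeaderB l))
        (d.insert cc (PySem.Str.join "\n" (code ++ lines.takeWhile (fun l => !pvIsHeaderB l)))) := by
  induction lines generalizing d cc code with
  | nil => simp [pvFinA, pvSegsB, hcc]
  | cons l ls ih =>
    by_cases hl : pvIsHeaderA l = true
    · have hname : pvNameA l = "class" := pv_name_class l hl
      have hB : pvIsHeaderB l = true := hl
      simp only [List.foldl_cons, pvStepA, hl, List.dropWhile, hB, Bool.not_true,
        List.takeWhile, if_true]
      rw [ih _ _ _ (by rw [hname]; decide)]
      simp [pvSegsB, List.span_eq_takeWhile_dropWhile, hcc, pvNameB_eq]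
    · have hl' : pvIsHeaderA l = false := by simpa using hl
      have hB : pvIsHeaderB l = false := hl'
      simp only [List.foldl_cons, pvStepA, hl', List.dropWhile, hB, Bool.not_false,
        List.takeWhile, Bool.false_eq_true, if_false, hcc, ite_true, ne_eq,
        not_false_iff]
      rw [ih _ _ _ hcc]
      simp

theorem pv_L0 (lines : List String) :
    pvFinA (lines.foldl pvStepA (PySem.Dict.empty, "", [])) =
      pvSegsB (lines.dropWhile (fun l => !pvIsHeaderB l)) PySem.Dict.empty := by
  induction lines with
  | nil => simp [pvFinA, pvSegsB]
  | cons l ls ih =>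
    by_cases hl : pvIsHeaderA l = true
    · have hname : pvNameA l = "class" := pv_name_class l hl
      have hB : pvIsHeaderB l = true := hl
      simp only [List.foldl_cons, pvStepA, hl, List.dropWhile, hB, Bool.not_true, if_true]
      rw [pv_L1 _ _ _ _ (by rw [hname]; decide)]
      simp [pvSegsB, List.span_eq_takeWhile_dropWhile, pvNameB_eq]
    · have hl' : pvIsHeaderA l = false := by simpa using hl
      have hB : pvIsHeaderB l = false := hl'
      simp only [List.foldl_cons, pvStepA, hl', List.dropWhile, hB, Bool.not_false,
        Bool.false_eq_true, if_false]
      simpa using ih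

-- ===== VERDICT (by name: the statement is the Claim_ definition above) =====
theorem parse_extracted_classes_spec : Claim_equal_parse_extracted_classes := by
  intro s _
  show _ = _
  unfold parse_extracted_classes parse_extracted_classes_alt
  rw [pv_L0]
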